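-- pv_equiv track=rewrite | github.com/khanhsaan/white-christmas | backend/main.example.py | id24_to_bits
-- ===== SOURCE A (Python) =====
-- MARKER_BYTE = 0xAC  # 8-bit marker: 1010 1100
--
-- def id24_to_bits(id24: int):
--     """
--     Encode into 32 bits:
--       bits[0..7]   = MARKER_BYTE (fixed pattern)
--       bits[8..31]  = id24 (MSB first)
--     """
--     bits = []
--
--     # marker bits
--     for i in range(8):
--         bit = (MARKER_BYTE >> (7 - i)) & 1
--         bits.append(bit)
--
--     # id24 bits
--     for i in range(24):
--         bit = (id24 >> (23 - i)) & 1
--         bits.append(bit)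
--
--     assert len(bits) == 32
--     return bits
-- ===== SOURCE B (Python) =====
-- MARKER_BYTE = 0xAC  # 8-bit marker: 1010 1100
--
-- def id24_to_bits(id24: int):
--     # Pack marker and the low 24 bits of id24 into one 32-bit integer,
--     # then render it as a fixed-width binary string.
--     combined = (MARKER_BYTE << 24) + (id24 % 0x1000000)
--     return [int(c) for c in format(combined, '032b')]
-- ===== Notes on version B (the rewrite author's own statement) =====
-- stated objective: idiomatic
-- what changed: Instead of two shift-and-mask loops appending bits, B packs the marker byte and the low twenty-four bits of id24 (via a modulus mask) into one thirty-two-bit integer and renders it with format(combined, '032b').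
import Mathlib
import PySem

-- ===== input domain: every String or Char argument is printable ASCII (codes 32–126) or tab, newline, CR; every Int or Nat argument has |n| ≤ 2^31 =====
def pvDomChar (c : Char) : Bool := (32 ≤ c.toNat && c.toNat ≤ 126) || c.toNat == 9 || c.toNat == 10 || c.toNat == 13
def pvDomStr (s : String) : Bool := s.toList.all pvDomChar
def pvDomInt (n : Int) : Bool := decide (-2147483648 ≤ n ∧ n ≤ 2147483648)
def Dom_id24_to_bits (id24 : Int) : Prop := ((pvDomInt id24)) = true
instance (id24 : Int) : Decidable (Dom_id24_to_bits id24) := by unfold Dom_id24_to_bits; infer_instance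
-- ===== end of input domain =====

-- B packs the marker byte and the masked id into one thirty-two-bit integer and renders it
-- as a fixed-width binary digit list, replacing A's two shift-and-mask loops (objective: idiomatic).

-- ===== PORT A =====
def id24_to_bits (id24 : Int) : List Int :=
  let bits : List Int := []
  let bits := (PySem.List.pyRange 0 8 1).foldl
    (fun bits i => bits ++ [PySem.Int.band ((172 : Int) >>> (7 - i).toNat) 1]) bits
  let bits := (PySem.List.pyRange 0 24 1).foldl
    (fun bits i => bits ++ [PySem.Int.band (id24 >>> (23 - i).toNat) 1]) bits
  bits

-- ===== PORT B =====
-- port of format(n, 'b'): binary digits, least-significant first (reversed at use site)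
def binRev (n : Nat) : List Int :=
  if h : n = 0 then [] else ((n % 2 : Nat) : Int) :: binRev (n / 2)
decreasing_by exact Nat.div_lt_self (Nat.pos_of_ne_zero h) one_lt_two

-- port of format(n, '032b') followed by [int(c) for c in …]
def fmt032b (n : Nat) : List Int :=
  List.replicate (32 - (binRev n).length) 0 ++ (binRev n).reverse

def id24_to_bits_alt (id24 : Int) : List Int :=
  let combined : Int := ((172 : Int) <<< 24) + PySem.Int.mod id24 16777216
  fmt032b combined.toNat

-- ===== PRECONDITION & SPEC =====
def Spec_id24_to_bits (id24 : Int) (out : List Int) : Prop := out = id24_to_bits_alt id24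
instance (id24 : Int) (out : List Int) : Decidable (Spec_id24_to_bits id24 out) := by unfold Spec_id24_to_bits; infer_instance

-- ===== CLAIM (what is proved, stated in full; the proofs are below) =====
def Claim_equal_id24_to_bits : Prop := ∀ (id24 : Int), Dom_id24_to_bits id24 → Spec_id24_to_bits id24 (id24_to_bits id24)

-- ===== LEMMAS AND PROOFS =====

-- left-padding binRev's reversed digits to width k (fmt032b n = padBin 32 n)
def padBin (k n : Nat) : List Int :=
  List.replicate (k - (binRev n).length) 0 ++ (binRev n).reverse

theorem padBin_succ (k n : Nat) :
    padBin (k + 1) n = padBin k (n / 2) ++ [((n % 2 : Nat) : Int)] := by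
  by_cases h : n = 0
  · subst h
    simp [padBin, binRev, List.replicate_succ']
  · rw [padBin, padBin, binRev]
    simp [h, Nat.succ_sub_succ]

theorem padBin_eq_map (k : Nat) : ∀ n : Nat, n < 2 ^ k →
    padBin k n = (List.range k).map (fun i => (((n >>> (k - 1 - i)) % 2 : Nat) : Int)) := by
  induction k with
  | zero =>
    intro n hn
    interval_cases n
    simp [padBin, binRev]
  | succ k ih =>
    intro n hn
    have hdiv : n / 2 < 2 ^ k := by
      have := Nat.pow_succ 2 k
      omega
    rw [padBin_succ, ih (n / 2) hdiv, List.range_succ, List.map_append]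
    congr 1
    · apply List.map_congr_left
      intro i hi
      have hik : i < k := List.mem_range.mp hi
      have h1 : k + 1 - 1 - i = (k - 1 - i) + 1 := by omega
      rw [h1]
      simp only [Nat.shiftRight_eq_div_pow, pow_succ]
      rw [Nat.div_div_eq_div_mul, Nat.mul_comm]
    · simp

theorem fmt032b_eq_padBin (n : Nat) : fmt032b n = padBin 32 n := rfl

theorem int_shr_eq_div (m k : Int) (hk : 0 ≤ k) : m >>> k = m / 2 ^ k.toNat := by
  obtain ⟨n, rfl⟩ := Int.eq_ofNat_of_zero_le hk
  rw [Int.shiftRight_natCast_right, Int.shiftRight_eq_div_pow]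
  norm_num

theorem id24_to_bits_eq (id24 : Int) : id24_to_bits id24 = id24_to_bits_alt id24 := by
  have hm0 : 0 ≤ PySem.Int.mod id24 16777216 := PySem.Int.mod_nonneg _ (by norm_num)
  have hmlt : PySem.Int.mod id24 16777216 < 16777216 := PySem.Int.mod_lt _ (by norm_num)
  have hme : PySem.Int.mod id24 16777216 = id24 % 16777216 :=
    PySem.Int.mod_eq_emod_of_pos (by norm_num)
  unfold id24_to_bits id24_to_bits_alt
  simp only [PySem.List.foldl_append_singleton_eq_map, List.nil_append]
  obtain ⟨mn, hmn⟩ : ∃ mn : Nat, (mn : Int) = PySem.Int.mod id24 16777216 :=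
    ⟨(PySem.Int.mod id24 16777216).toNat, Int.toNat_of_nonneg hm0⟩
  have hcomb : ((172:Int) <<< 24 + PySem.Int.mod id24 16777216).toNat = 2885681152 + mn := by
    have h1 : ((172:Int) <<< 24) = 2885681152 := by decide
    rw [h1]; omega
  rw [hcomb, fmt032b_eq_padBin, padBin_eq_map 32 _ (by omega)]
  rw [(by decide : PySem.List.pyRange 0 8 1 = [0,1,2,3,4,5,6,7]),
      (by decide : PySem.List.pyRange 0 24 1 =
        [0,1,2,3,4,5,6,7,8,9,10,11,12,13,14,15,16,17,18,19,20,21,22,23]),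
      (by decide : List.range 32 =
        [0,1,2,3,4,5,6,7,8,9,10,11,12,13,14,15,16,17,18,19,20,21,22,23,24,25,26,27,28,29,30,31])]
  simp only [List.map_cons, List.map_nil, List.cons_append, List.nil_append, List.cons.injEq,
    and_true]
  have hmod2 : (0:Int) < 2 := by norm_num
  refine ⟨?_,?_,?_,?_,?_,?_,?_,?_,?_,?_,?_,?_,?_,?_,?_,?_,?_,?_,?_,?_,?_,?_,?_,?_,?_,?_,?_,?_,?_,?_,?_,?_⟩ <;>
    · norm_num [PySem.Int.band_one, PySem.Int.mod_eq_emod_of_pos hmod2,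
        Nat.shiftRight_eq_div_pow, Int.toNat]
      rw [int_shr_eq_div _ _ (by norm_num)]
      norm_num [Int.toNat]
      omega

-- ===== VERDICT (by name: the statement is the Claim_ definition above) =====
theorem id24_to_bits_spec : Claim_equal_id24_to_bits := by
  intro id24 _
  unfold Spec_id24_to_bits
  exact id24_to_bits_eq id24
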